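-- pv_equiv track=rewrite | github.com/mmichalak-swe/Algo_Expert_Python | Pattern_Matcher/attempt_3.py | getCountsAndFirstYPos
-- ===== SOURCE A (Python) =====
-- def getCountsAndFirstYPos(pattern, lenOfString):
--     counts = {}
--     firstYInPattern = None
--     # O(m) time
--     for i, char in enumerate(pattern):
--         if char in counts:
--             counts[char] += 1
--         else:
--             counts[char] = 1
--             if char == 'y':
--                 firstYInPattern = i
--
--     return counts, firstYInPattern
-- ===== SOURCE B (Python) =====
-- def getCountsAndFirstYPos(pattern, lenOfString):
--     chars = list(pattern)
--     counts = {c: chars.count(c) for c in dict.fromkeys(chars)}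
--     firstYInPattern = chars.index('y') if 'y' in chars else None
--     return counts, firstYInPattern
-- ===== Notes on version B (the rewrite author's own statement) =====
-- stated objective: idiomatic
-- what changed: Replaces A's fused loop (mutable dict + first-y tracking with membership branch) by two independent declarative passes: a dict comprehension over the ordered distinct characters with .count, and chars.index('y') guarded by membership.
import Mathlib
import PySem

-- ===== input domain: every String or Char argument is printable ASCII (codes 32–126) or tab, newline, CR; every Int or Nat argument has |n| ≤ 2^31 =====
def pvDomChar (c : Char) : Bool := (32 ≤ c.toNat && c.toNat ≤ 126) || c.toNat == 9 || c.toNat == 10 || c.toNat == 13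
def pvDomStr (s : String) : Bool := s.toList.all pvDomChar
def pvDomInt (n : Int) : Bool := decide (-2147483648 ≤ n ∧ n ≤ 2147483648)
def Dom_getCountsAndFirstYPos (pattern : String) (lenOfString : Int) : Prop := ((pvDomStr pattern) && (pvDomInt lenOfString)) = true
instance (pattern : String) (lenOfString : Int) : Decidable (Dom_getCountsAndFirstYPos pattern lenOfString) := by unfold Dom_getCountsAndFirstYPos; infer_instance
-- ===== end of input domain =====

-- B re-derives the same return value by two independent declarative passes (distinct-chars comprehension with count, and a guarded index of 'y') instead of A's single fused mutable loop; objective: idiomatic. lenOfString is unused, as in A.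

-- ===== PORT A =====
def getCountsAndFirstYPos (pattern : String) (lenOfString : Int) : (List (String × Int)) × Option Int :=
  let st := (PySem.List.enumerate pattern.toList 0).foldl
    (fun (st : PySem.Dict String Int × Option Int) ic =>
      let key := ic.2.toString
      if st.1.contains key then
        (st.1.insert key (st.1.getD key 0 + 1), st.2)
      else
        (st.1.insert key 1, if ic.2 = 'y' then some ic.1 else st.2))
    (PySem.Dict.empty, none)
  (st.1.items, st.2)

-- ===== PORT B =====
def getCountsAndFirstYPos_alt (pattern : String) (lenOfString : Int) : (List (String × Int)) × Option Int :=
  let chars := pattern.toList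
  let counts := (PySem.List.dedup chars).map (fun c => (c.toString, (chars.count c : Int)))
  let firstYInPattern : Option Int :=
    if 'y' ∈ chars then (PySem.List.index? chars 'y').map (fun n => (n : Int)) else none
  (counts, firstYInPattern)

-- ===== PRECONDITION & SPEC =====
def Spec_getCountsAndFirstYPos (pattern : String) (lenOfString : Int) (out : (List (String × Int)) × Option Int) : Prop := out = getCountsAndFirstYPos_alt pattern lenOfString
instance (pattern : String) (lenOfString : Int) (out : (List (String × Int)) × Option Int) : Decidable (Spec_getCountsAndFirstYPos pattern lenOfString out) := by unfold Spec_getCountsAndFirstYPos; infer_instance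

-- ===== CLAIM (what is proved, stated in full; the proofs are below) =====
def Claim_equal_getCountsAndFirstYPos : Prop := ∀ (pattern : String) (lenOfString : Int), Dom_getCountsAndFirstYPos pattern lenOfString → Spec_getCountsAndFirstYPos pattern lenOfString (getCountsAndFirstYPos pattern lenOfString)

-- ===== LEMMAS AND PROOFS =====

theorem charToString_injective : Function.Injective Char.toString := by
  intro a b h
  have := congrArg String.toList h
  simpa using this

theorem loopA (cs : List Char) :
    (PySem.List.enumerate cs 0).foldl
      (fun (st : PySem.Dict String Int × Option Int) ic =>
        let key := ic.2.toString
        if st.1.contains key then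
          (st.1.insert key (st.1.getD key 0 + 1), st.2)
        else
          (st.1.insert key 1, if ic.2 = 'y' then some ic.1 else st.2))
      (PySem.Dict.empty, none)
    = (PySem.Dict.counter (cs.map Char.toString),
       (PySem.List.index? cs 'y').map (fun n => (n : Int))) := by
  induction cs using List.reverseRecOn with
  | nil => rfl
  | append_singleton pre c ih =>
    rw [PySem.List.enumerate_append, List.foldl_append, ih]
    rw [List.map_append, List.map_singleton, PySem.Dict.counter_append_singleton]
    simp only [PySem.List.enumerate_cons, PySem.List.enumerate_nil, List.foldl_cons,
      List.foldl_nil]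
    have hmod : ((PySem.Dict.counter (pre.map Char.toString)).modify c.toString 0 (· + 1))
        = (PySem.Dict.counter (pre.map Char.toString)).insert c.toString
            ((PySem.Dict.counter (pre.map Char.toString)).getD c.toString 0 + 1) :=
      PySem.Dict.ext_iff.mpr rfl
    have hcont : (PySem.Dict.counter (pre.map Char.toString)).contains c.toString
        = pre.contains c := by
      rw [PySem.Dict.contains_counter]
      simp only [List.contains_eq_mem, List.mem_map, decide_eq_decide]
      constructor
      · rintro ⟨x, hx, he⟩
        have hcx : x = c := by have := congrArg String.toList he; simpa using this
        exact hcx ▸ hx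
      · intro hc; exact ⟨c, hc, rfl⟩
    rw [hmod]
    by_cases h : c ∈ pre
    · simp only [hcont, List.contains_eq_mem, h, decide_true, if_true]
      refine Prod.ext rfl ?_
      by_cases hy : 'y' ∈ pre
      · rw [PySem.List.index?_append_of_mem [c] hy]
      · have hcy : ¬ ('y' = c) := fun hh => hy (hh ▸ h)
        have h1 : PySem.List.index? pre 'y' = none :=
          (PySem.List.index?_eq_none_iff pre 'y').mpr hy
        have h2 : PySem.List.index? (pre ++ [c]) 'y' = none := by
          rw [PySem.List.index?_eq_none_iff]
          simp [hy, hcy]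
        rw [h1, h2]
    · simp only [hcont, List.contains_eq_mem, h, decide_false, Bool.false_eq_true, if_false]
      have hgd : (PySem.Dict.counter (pre.map Char.toString)).getD c.toString 0 = 0 := by
        rw [PySem.Dict.getD_counter]
        have hnm : c.toString ∉ pre.map Char.toString := by
          simp only [List.mem_map]
          rintro ⟨x, hx, he⟩
          have hcx : x = c := by have := congrArg String.toList he; simpa using this
          exact h (hcx ▸ hx)
        rw [List.count_eq_zero.mpr (by simpa using hnm)]
        rfl
      rw [hgd]
      refine Prod.ext (by norm_num) ?_
      by_cases hcy : c = 'y'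
      · subst hcy
        rw [PySem.List.index?_append_singleton_self pre 'y' h]
        simp
      · simp only [hcy, if_false]
        have hyc : ¬ ('y' = c) := fun hh => hcy hh.symm
        by_cases hy : 'y' ∈ pre
        · rw [PySem.List.index?_append_of_mem [c] hy]
        · have h1 : PySem.List.index? pre 'y' = none :=
            (PySem.List.index?_eq_none_iff pre 'y').mpr hy
          have h2 : PySem.List.index? (pre ++ [c]) 'y' = none := by
            rw [PySem.List.index?_eq_none_iff]
            simp [hy, hyc]
          rw [h1, h2]

theorem ofList_map_inj {f : Char → String} (hf : Function.Injective f) (cs : List Char) :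
    PySem.Set.ofList (cs.map f) = (PySem.Set.ofList cs).map f := by
  induction cs using List.reverseRecOn with
  | nil => rfl
  | append_singleton pre c ih =>
    rw [List.map_append, List.map_singleton, PySem.Set.ofList_append_singleton,
        PySem.Set.ofList_append_singleton, ih]
    by_cases h : c ∈ pre
    · simp [PySem.Set.add, PySem.Set.mem_ofList, h, hf.eq_iff]
    · have h2 : ¬ ∃ x ∈ pre, f x = f c := by
        rintro ⟨x, hx, he⟩; exact h (hf he ▸ hx)
      simp [PySem.Set.add, PySem.Set.mem_ofList, h, h2]

-- ===== VERDICT (by name: the statement is the Claim_ definition above) =====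
theorem getCountsAndFirstYPos_spec : Claim_equal_getCountsAndFirstYPos := by
  intro pattern lenOfString _
  show getCountsAndFirstYPos pattern lenOfString = getCountsAndFirstYPos_alt pattern lenOfString
  unfold getCountsAndFirstYPos getCountsAndFirstYPos_alt
  rw [loopA]
  refine Prod.ext ?_ ?_
  · show (PySem.Dict.counter (pattern.toList.map Char.toString)).items = _
    rw [PySem.Dict.items_counter, ofList_map_inj charToString_injective]
    show _ = (PySem.List.dedup pattern.toList).map
        (fun c => (c.toString, (pattern.toList.count c : Int)))
    rw [PySem.List.dedup_eq_ofList, List.map_map]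
    refine List.map_congr_left ?_
    intro c _
    simp only [Function.comp]
    rw [List.count_map_of_injective _ _ charToString_injective]
  · show (PySem.List.index? pattern.toList 'y').map (fun n => (n : Int)) = _
    by_cases hy : 'y' ∈ pattern.toList
    · simp [hy]
    · have h1 : PySem.List.index? pattern.toList 'y' = none :=
        (PySem.List.index?_eq_none_iff pattern.toList 'y').mpr hy
      rw [h1]
      simp [hy]
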